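-- pv_equiv track=rewrite | github.com/ashleyharris-maptek-com-au/SpatialCompetenceBenchmark | 16.py | get_3factor_decompositions
-- ===== SOURCE A (Python) =====
-- from math import isqrt
--
-- def get_divisors(n):
--   """Get all divisors of n."""
--   divisors = []
--   for i in range(1, isqrt(n) + 1):
--     if n % i == 0:
--       divisors.append(i)
--       if i != n // i:
--         divisors.append(n // i)
--   return sorted(divisors)
--
-- def get_3factor_decompositions(n):
--   """Get all ways to write n as x*y*z where x <= y <= z and all > 1."""
--   decompositions = []
--   divisors = [d for d in get_divisors(n) if d > 1]
--
--   for x in divisors: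
--     if x * x * x > n:
--       break
--     if n % x != 0:
--       continue
--     remainder = n // x
--     for y in divisors:
--       if y < x:
--         continue
--       if y * y > remainder:
--         break
--       if remainder % y != 0:
--         continue
--       z = remainder // y
--       if z >= y:
--         decompositions.append((x, y, z))
--
--   return decompositions
-- ===== SOURCE B (Python) =====
-- def get_3factor_decompositions(n):
--   """Get all ways to write n as x*y*z where x <= y <= z and all > 1."""
--   decompositions = []
--   x = 2
--   while x * x * x <= n:
--     if n % x == 0:
--       remainder = n // x
--       y = x
--       while y * y <= remainder:
--         if remainder % y == 0:
--           z = remainder // y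
--           if z >= y:
--             decompositions.append((x, y, z))
--         y += 1
--     x += 1
--   return decompositions
-- ===== Notes on version B (the rewrite author's own statement) =====
-- stated objective: simpler
-- what changed: Dropped get_divisors and the sorted divisor table entirely: B enumerates x by direct trial division up to the cube root and y up to the square root of the remainder, emitting the same triples in the same order.
import Mathlib
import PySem

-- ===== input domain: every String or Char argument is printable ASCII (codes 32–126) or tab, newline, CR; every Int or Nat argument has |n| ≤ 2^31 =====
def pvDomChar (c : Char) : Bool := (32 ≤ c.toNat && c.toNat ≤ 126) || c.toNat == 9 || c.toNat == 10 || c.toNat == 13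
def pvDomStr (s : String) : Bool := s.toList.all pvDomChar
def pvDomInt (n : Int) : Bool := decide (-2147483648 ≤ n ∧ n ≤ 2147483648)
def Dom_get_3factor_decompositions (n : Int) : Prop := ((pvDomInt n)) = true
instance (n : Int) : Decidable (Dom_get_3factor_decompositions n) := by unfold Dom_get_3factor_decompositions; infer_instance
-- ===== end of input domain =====

-- B drops A's divisor table and enumerates factors by direct trial division (simpler);
-- return values agree on all non-negative n (on negative n A raises ValueError in math.isqrt, excluded by Pre_).

-- ===== PORT A =====
-- math.isqrt(n) for non-negative n (exact there; Python raises ValueError on negative n, excluded by Pre_)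
def pyIsqrt (n : Int) : Int := (Nat.sqrt n.toNat : Int)

def get_divisors (n : Int) : List Int :=
  PySem.List.sorted
    ((PySem.List.pyRange 1 (pyIsqrt n + 1) 1).foldl
      (fun divisors i =>
        if PySem.Int.mod n i = 0 then
          let d1 := divisors ++ [i]
          if i ≠ PySem.Int.floordiv n i then d1 ++ [PySem.Int.floordiv n i] else d1
        else divisors)
      [])
    (fun d => d) false

-- inner 'for y in divisors' loop of A (continue/break/continue/append, acc-threaded)
def aInner (x rem : Int) : List Int → List (Int × Int × Int) → List (Int × Int × Int)
  | [], acc => acc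
  | y :: ys, acc =>
    if y < x then aInner x rem ys acc
    else if y * y > rem then acc
    else if PySem.Int.mod rem y ≠ 0 then aInner x rem ys acc
    else
      let z := PySem.Int.floordiv rem y
      if z ≥ y then aInner x rem ys (acc ++ [(x, y, z)]) else aInner x rem ys acc

-- outer 'for x in divisors' loop of A
def aOuter (n : Int) (divisors : List Int) : List Int → List (Int × Int × Int) → List (Int × Int × Int)
  | [], acc => acc
  | x :: xs, acc =>
    if x * x * x > n then acc
    else if PySem.Int.mod n x ≠ 0 then aOuter n divisors xs acc
    else aOuter n divisors xs (aInner x (PySem.Int.floordiv n x) divisors acc)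

def get_3factor_decompositions (n : Int) : List (Int × Int × Int) :=
  let divisors := (get_divisors n).filter (fun d => decide (d > 1))
  aOuter n divisors divisors []

-- ===== PORT B =====
-- inner 'while y * y <= remainder' loop of B (fuel only bounds the iteration count; it is
-- chosen large enough at the call site that the 0-fuel case is never reached)
def bInner (x rem : Int) : Nat → Int → List (Int × Int × Int) → List (Int × Int × Int)
  | 0, _, acc => acc
  | fuel + 1, y, acc =>
    if y * y ≤ rem then
      if PySem.Int.mod rem y = 0 then
        let z := PySem.Int.floordiv rem y
        if z ≥ y then bInner x rem fuel (y + 1) (acc ++ [(x, y, z)])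
        else bInner x rem fuel (y + 1) acc
      else bInner x rem fuel (y + 1) acc
    else acc

-- outer 'while x * x * x <= n' loop of B
def bOuter (n : Int) : Nat → Int → List (Int × Int × Int) → List (Int × Int × Int)
  | 0, _, acc => acc
  | fuel + 1, x, acc =>
    if x * x * x ≤ n then
      if PySem.Int.mod n x = 0 then
        let rem := PySem.Int.floordiv n x
        bOuter n fuel (x + 1) (bInner x rem (rem + 1).toNat x acc)
      else bOuter n fuel (x + 1) acc
    else acc

def get_3factor_decompositions_alt (n : Int) : List (Int × Int × Int) :=
  bOuter n (n + 1).toNat 2 []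

-- ===== PRECONDITION & SPEC =====
-- Pre_ excludes negative n, where math.isqrt makes A raise ValueError.
def Pre_get_3factor_decompositions (n : Int) : Prop := 0 ≤ n
instance (n : Int) : Decidable (Pre_get_3factor_decompositions n) := by unfold Pre_get_3factor_decompositions; infer_instance
def pvWitness_get_3factor_decompositions : Int := 60

def Spec_get_3factor_decompositions (n : Int) (out : List (Int × Int × Int)) : Prop := out = get_3factor_decompositions_alt n
instance (n : Int) (out : List (Int × Int × Int)) : Decidable (Spec_get_3factor_decompositions n out) := by unfold Spec_get_3factor_decompositions; infer_instance

-- ===== CLAIM (what is proved, stated in full; the proofs are below) =====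
def Claim_equal_get_3factor_decompositions : Prop := ∀ (n : Int), Dom_get_3factor_decompositions n → Pre_get_3factor_decompositions n → Spec_get_3factor_decompositions n (get_3factor_decompositions n)

-- ===== LEMMAS AND PROOFS =====

-- bracketing facts for the ported math.isqrt
theorem isq_hi (n : Int) (hn : 0 ≤ n) : n < (pyIsqrt n + 1) * (pyIsqrt n + 1) := by
  have := Nat.lt_succ_sqrt' n.toNat
  zify at this
  rw [pow_two, Int.toNat_of_nonneg hn] at this
  exact this

theorem isq_lo (n : Int) (hn : 0 ≤ n) : pyIsqrt n * pyIsqrt n ≤ n := by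
  have := Nat.sqrt_le' n.toNat
  zify at this
  rw [pow_two, Int.toNat_of_nonneg hn] at this
  exact this

theorem isq_le (n : Int) (hn : 0 ≤ n) : pyIsqrt n ≤ n := by
  have := Nat.sqrt_le_self n.toNat
  simp only [pyIsqrt]
  omega

theorem isq_nonneg (n : Int) : 0 ≤ pyIsqrt n := Int.natCast_nonneg _

-- what one iteration of A's divisor-building loop contributes
def dGen (n i : Int) : List Int :=
  if PySem.Int.mod n i = 0 then
    i :: (if i ≠ PySem.Int.floordiv n i then [PySem.Int.floordiv n i] else [])
  else []

theorem mem_dGen (n i a : Int) : a ∈ dGen n i ↔ PySem.Int.mod n i = 0 ∧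
    (a = i ∨ (i ≠ PySem.Int.floordiv n i ∧ a = PySem.Int.floordiv n i)) := by
  by_cases h1 : PySem.Int.mod n i = 0
  · by_cases h2 : i ≠ PySem.Int.floordiv n i <;> simp [dGen, h1, h2] <;> tauto
  · simp [dGen, h1]

theorem build_eq_flatMap (n : Int) (L : List Int) :
    L.foldl
      (fun divisors i =>
        if PySem.Int.mod n i = 0 then
          let d1 := divisors ++ [i]
          if i ≠ PySem.Int.floordiv n i then d1 ++ [PySem.Int.floordiv n i] else d1
        else divisors)
      [] = L.flatMap (dGen n) := by
  have hf : (fun divisors i =>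
        if PySem.Int.mod n i = 0 then
          let d1 := divisors ++ [i]
          if i ≠ PySem.Int.floordiv n i then d1 ++ [PySem.Int.floordiv n i] else d1
        else divisors) = fun (acc : List Int) i => acc ++ dGen n i := by
    funext acc i
    by_cases h1 : PySem.Int.mod n i = 0
    · by_cases h2 : i ≠ PySem.Int.floordiv n i <;> simp [dGen, h1, h2]
    · simp [dGen, h1]
  rw [hf, PySem.List.foldl_append_eq_flatMap]
  simp

theorem mem_build (n : Int) (hn : 0 ≤ n) (d : Int) :
    d ∈ (PySem.List.pyRange 1 (pyIsqrt n + 1) 1).flatMap (dGen n) ↔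
      (1 ≤ d ∧ d ≤ n ∧ PySem.Int.mod n d = 0) := by
  simp only [List.mem_flatMap, PySem.List.mem_pyRange_one]
  constructor
  · rintro ⟨i, ⟨h1i, his⟩, hmem⟩
    have his' : i ≤ pyIsqrt n := by omega
    have hipos : (0:Int) < i := by omega
    simp only [dGen] at hmem
    by_cases hmod : PySem.Int.mod n i = 0
    · have hdvd : i ∣ n := (PySem.Int.mod_eq_zero_iff_dvd n i).mp hmod
      have hfd : PySem.Int.floordiv n i = n / i := PySem.Int.floordiv_eq_ediv_of_pos hipos
      simp only [hmod, if_true, List.mem_cons, hfd] at hmem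
      rcases hmem with rfl | hmem
      · exact ⟨h1i, le_trans his' (isq_le n hn), hmod⟩
      · have hne : i ≠ n / i := by
          by_cases h : i ≠ n / i
          · exact h
          · simp [h, hfd] at hmem
        have hd : d = n / i := by
          by_cases h : i ≠ n / i <;> simp [h, hfd] at hmem <;> tauto
        subst hd
        refine ⟨?_, Int.ediv_le_self i hn, ?_⟩
        · rw [Int.le_ediv_iff_mul_le hipos, one_mul]
          exact le_trans his' (isq_le n hn)
        · rw [PySem.Int.mod_eq_zero_iff_dvd]
          exact Dvd.intro i (Int.ediv_mul_cancel hdvd)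
    · simp [hmod] at hmem
  · rintro ⟨h1d, hdn, hmod⟩
    have hdpos : (0:Int) < d := by omega
    have hdvd : d ∣ n := (PySem.Int.mod_eq_zero_iff_dvd n d).mp hmod
    by_cases hds : d ≤ pyIsqrt n
    · exact ⟨d, ⟨h1d, by omega⟩, by simp [dGen, hmod]⟩
    · push_neg at hds
      set s := pyIsqrt n with hs
      set i := n / d with hi
      have hn1 : (1:Int) ≤ n := le_trans h1d hdn
      have h1i : 1 ≤ i := by rw [hi, Int.le_ediv_iff_mul_le hdpos, one_mul]; exact hdn
      have his : i ≤ s := by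
        have hlt : i < s + 1 := by
          rw [hi, Int.ediv_lt_iff_lt_mul hdpos]
          calc n < (s+1)*(s+1) := isq_hi n hn
          _ ≤ (s+1)*d := by
            have : s + 1 ≤ d := by omega
            have h0 : (0:Int) ≤ s + 1 := by have := isq_nonneg n; omega
            nlinarith
        omega
      have hipos : (0:Int) < i := by omega
      have hidn : i * d = n := by rw [hi]; exact Int.ediv_mul_cancel hdvd
      have hidvd : i ∣ n := ⟨d, hidn.symm⟩
      have hie : n / i = d := by
        rw [← hidn, Int.mul_ediv_cancel_left _ (by omega : i ≠ 0)]
      refine ⟨i, ⟨h1i, by omega⟩, ?_⟩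
      have hfd : PySem.Int.floordiv n i = n / i := PySem.Int.floordiv_eq_ediv_of_pos hipos
      have hne : i ≠ PySem.Int.floordiv n i := by rw [hfd, hie]; omega
      have hineq : ¬ i = d := by omega
      simp [dGen, (PySem.Int.mod_eq_zero_iff_dvd n i).mpr hidvd, hne, hfd, hie, hineq]

theorem nodup_build (n : Int) (hn : 0 ≤ n) :
    ((PySem.List.pyRange 1 (pyIsqrt n + 1) 1).flatMap (dGen n)).Nodup := by
  rw [List.nodup_flatMap]
  constructor
  · intro i hi
    by_cases h1 : PySem.Int.mod n i = 0
    · by_cases h2 : i ≠ PySem.Int.floordiv n i <;> simp [dGen, h1, h2]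
    · simp [dGen, h1]
  · refine List.Pairwise.imp_of_mem ?_ (PySem.List.pairwise_lt_pyRange_one 1 (pyIsqrt n + 1))
    intro i j hi hj hij a hai haj
    rw [PySem.List.mem_pyRange_one] at hi hj
    rw [mem_dGen] at hai haj
    obtain ⟨hmi, hai⟩ := hai
    obtain ⟨hmj, haj⟩ := haj
    have hipos : (0:Int) < i := by omega
    have hjpos : (0:Int) < j := by omega
    have hdi : i ∣ n := (PySem.Int.mod_eq_zero_iff_dvd n i).mp hmi
    have hdj : j ∣ n := (PySem.Int.mod_eq_zero_iff_dvd n j).mp hmj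
    have hfi : PySem.Int.floordiv n i = n / i := PySem.Int.floordiv_eq_ediv_of_pos hipos
    have hfj : PySem.Int.floordiv n j = n / j := PySem.Int.floordiv_eq_ediv_of_pos hjpos
    set s := pyIsqrt n with hs
    have hjs : j ≤ s := by omega
    have his : i ≤ s - 1 := by omega
    have hlo := isq_lo n hn
    have hjnj : j ≤ n / j := by
      rw [Int.le_ediv_iff_mul_le hjpos]; nlinarith
    have hni : s + 1 ≤ n / i := by
      rw [Int.le_ediv_iff_mul_le hipos]; nlinarith
    have hmuli : i * (n / i) = n := Int.mul_ediv_cancel' hdi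
    have hmulj : j * (n / j) = n := Int.mul_ediv_cancel' hdj
    rw [hfi] at hai
    rw [hfj] at haj
    rcases hai with rfl | ⟨hne, rfl⟩ <;> rcases haj with h | ⟨hne2, h⟩
    · omega
    · omega
    · omega
    · have h1 : n / (n / i) = i := by
        have hc := Int.mul_ediv_cancel i (by omega : (n / i) ≠ 0)
        rw [hmuli] at hc; exact hc
      have h2 : n / (n / j) = j := by
        have hc := Int.mul_ediv_cancel j (by omega : (n / j) ≠ 0)
        rw [hmulj] at hc; exact hc
      have : i = j := by rw [← h1, h, h2]
      omega

-- get_divisors, filtered to d > 1, is exactly the divisors of n among [2..n]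
theorem divisors_eq (n : Int) (hn : 0 ≤ n) :
    (get_divisors n).filter (fun d => decide (d > 1)) =
      (PySem.List.pyRange 2 (n + 1) 1).filter (fun d => decide (PySem.Int.mod n d = 0)) := by
  have hsorted : get_divisors n =
      (PySem.List.pyRange 1 (n + 1) 1).filter (fun d => decide (PySem.Int.mod n d = 0)) := by
    unfold get_divisors
    rw [build_eq_flatMap]
    have hperm : ((PySem.List.pyRange 1 (n + 1) 1).filter
        (fun d => decide (PySem.Int.mod n d = 0))).Perm
        ((PySem.List.pyRange 1 (pyIsqrt n + 1) 1).flatMap (dGen n)) := by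
      refine (List.perm_ext_iff_of_nodup ?_ (nodup_build n hn)).mpr ?_
      · exact ((PySem.List.pairwise_lt_pyRange_one 1 (n+1)).filter _).imp (fun h => ne_of_lt h)
      · intro a
        rw [mem_build n hn a, List.mem_filter, PySem.List.mem_pyRange_one]
        simp only [decide_eq_true_eq]
        omega
    have hpair : ((PySem.List.pyRange 1 (n + 1) 1).filter
        (fun d => decide (PySem.Int.mod n d = 0))).Pairwise
        (fun a b => (fun d => d) a < (fun d => d) b) :=
      (PySem.List.pairwise_lt_pyRange_one 1 (n+1)).filter _
    exact PySem.List.sorted_eq_of_perm_of_pairwise_lt _ _ (fun d => d) hperm hpair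
  rw [hsorted]
  by_cases hn1 : 1 ≤ n
  · rw [PySem.List.pyRange_one_cons (by omega : (1:Int) < n + 1)]
    have h1div : PySem.Int.mod n 1 = 0 := by
      rw [PySem.Int.mod_eq_zero_iff_dvd]; exact one_dvd n
    rw [List.filter_cons]
    simp only [h1div, decide_true, if_true, List.filter_cons]
    norm_num
    refine List.filter_congr ?_
    intro a ha
    rw [PySem.List.mem_pyRange_one] at ha
    simp [show (1:Int) < a by omega]
  · rw [PySem.List.pyRange_one_eq_nil (by omega : n + 1 ≤ 1),
        PySem.List.pyRange_one_eq_nil (by omega : n + 1 ≤ 2)]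
    simp

-- list-with-break forms of B's two while loops (proof-side helpers)
def bInnerL (x rem : Int) : List Int → List (Int × Int × Int) → List (Int × Int × Int)
  | [], acc => acc
  | y :: ys, acc =>
    if y * y > rem then acc
    else if PySem.Int.mod rem y ≠ 0 then bInnerL x rem ys acc
    else
      let z := PySem.Int.floordiv rem y
      if z ≥ y then bInnerL x rem ys (acc ++ [(x, y, z)]) else bInnerL x rem ys acc

def bOuterL (n : Int) : List Int → List (Int × Int × Int) → List (Int × Int × Int)
  | [], acc => acc
  | x :: xs, acc =>
    if x * x * x > n then acc
    else if PySem.Int.mod n x ≠ 0 then bOuterL n xs acc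
    else bOuterL n xs (bInnerL x (PySem.Int.floordiv n x) (PySem.List.pyRange x (n + 1) 1) acc)

-- the per-y body shared by both inner loops
def gBody (x rem y : Int) : List (Int × Int × Int) :=
  if PySem.Int.floordiv rem y ≥ y then [(x, y, PySem.Int.floordiv rem y)] else []

theorem bInnerL_eq (x rem : Int) : ∀ (L : List Int) (acc : List (Int × Int × Int)),
    bInnerL x rem L acc =
      acc ++ ((L.takeWhile (fun y => !decide (y * y > rem))).filter
        (fun y => decide (PySem.Int.mod rem y = 0))).flatMap (gBody x rem) := by
  intro L
  induction L with
  | nil => intro acc; simp [bInnerL]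
  | cons y ys ih =>
    intro acc
    by_cases h1 : y * y > rem
    · simp [bInnerL, h1]
    · by_cases h2 : PySem.Int.mod rem y = 0
      · by_cases h3 : PySem.Int.floordiv rem y ≥ y
        · simp [bInnerL, h1, h2, h3, ih, gBody]
        · simp [bInnerL, h1, h2, h3, ih, gBody]
      · simp [bInnerL, h1, h2, ih]

theorem aInner_eq_bInner (x rem : Int) : ∀ (L : List Int), L.Pairwise (· ≤ ·) →
    ∀ acc, aInner x rem L acc = bInnerL x rem (L.filter (fun y => !decide (y < x))) acc := by
  intro L
  induction L with
  | nil => intro _ acc; simp [aInner, bInnerL]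
  | cons y ys ih =>
    intro hp acc
    rw [List.pairwise_cons] at hp
    by_cases h0 : y < x
    · simpa [aInner, h0] using ih hp.2 acc
    · by_cases h1 : y * y > rem
      · simp [aInner, bInnerL, h0, h1]
      · by_cases h2 : PySem.Int.mod rem y = 0
        · by_cases h3 : PySem.Int.floordiv rem y ≥ y
          · simp [aInner, bInnerL, h0, h1, h2, h3, ih hp.2]
          · simp [aInner, bInnerL, h0, h1, h2, h3, ih hp.2]
        · simp [aInner, bInnerL, h0, h1, h2, ih hp.2]

theorem aInner_append (x rem : Int) : ∀ (L : List Int) (acc : List (Int × Int × Int)),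
    aInner x rem L acc = acc ++ aInner x rem L [] := by
  intro L
  induction L with
  | nil => intro acc; simp [aInner]
  | cons y ys ih =>
    intro acc
    by_cases h0 : y < x
    · simp [aInner, h0]; rw [ih acc]
    · by_cases h1 : y * y > rem
      · simp [aInner, h0, h1]
      · by_cases h2 : PySem.Int.mod rem y = 0
        · by_cases h3 : PySem.Int.floordiv rem y ≥ y
          · simp [aInner, h0, h1, h2, h3,
              ih (acc ++ [(x, y, PySem.Int.floordiv rem y)]),
              ih [(x, y, PySem.Int.floordiv rem y)]]
          · simp [aInner, h0, h1, h2, h3]; rw [ih acc]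
        · simp [aInner, h0, h1, h2]; rw [ih acc]

theorem aOuter_eq (n : Int) (divs : List Int) : ∀ (L : List Int) (acc : List (Int × Int × Int)),
    aOuter n divs L acc =
      acc ++ ((L.takeWhile (fun x => !decide (x * x * x > n))).filter
        (fun x => decide (PySem.Int.mod n x = 0))).flatMap
          (fun x => aInner x (PySem.Int.floordiv n x) divs []) := by
  intro L
  induction L with
  | nil => intro acc; simp [aOuter]
  | cons x xs ih =>
    intro acc
    by_cases h1 : x * x * x > n
    · simp [aOuter, h1]
    · by_cases h2 : PySem.Int.mod n x = 0
      · simp [aOuter, h1, h2, ih, aInner_append x (PySem.Int.floordiv n x) divs acc]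
      · simp [aOuter, h1, h2, ih]

theorem bOuterL_eq (n : Int) : ∀ (L : List Int) (acc : List (Int × Int × Int)),
    bOuterL n L acc =
      acc ++ ((L.takeWhile (fun x => !decide (x * x * x > n))).filter
        (fun x => decide (PySem.Int.mod n x = 0))).flatMap
          (fun x => bInnerL x (PySem.Int.floordiv n x) (PySem.List.pyRange x (n + 1) 1) []) := by
  intro L
  induction L with
  | nil => intro acc; simp [bOuterL]
  | cons x xs ih =>
    intro acc
    by_cases h1 : x * x * x > n
    · simp [bOuterL, h1]
    · by_cases h2 : PySem.Int.mod n x = 0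
      · rw [show bOuterL n (x :: xs) acc
            = bOuterL n xs (bInnerL x (PySem.Int.floordiv n x) (PySem.List.pyRange x (n + 1) 1) acc)
          from by simp [bOuterL, h1, h2]]
        rw [bInnerL_eq, ih]
        simp [h1, h2, bInnerL_eq]
      · simp [bOuterL, h1, h2, ih]

-- B's while loops agree with their list-with-break forms, given enough fuel
theorem bInner_as_list (x rem : Int) (hrem : 0 ≤ rem) :
    ∀ (f : Nat) (y : Int), (rem + 1 - y).toNat ≤ f → 1 ≤ y →
      ∀ (M : Int), (∀ z : Int, 1 ≤ z → z * z ≤ rem → z < M) →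
      ∀ acc, bInner x rem f y acc = bInnerL x rem (PySem.List.pyRange y M 1) acc := by
  intro f
  induction f with
  | zero =>
    intro y hk hy M hM acc
    have hnb : y * y > rem := by
      have h1 : rem < y := by omega
      nlinarith
    show acc = _
    by_cases hMy : M ≤ y
    · rw [PySem.List.pyRange_one_eq_nil hMy]; rfl
    · rw [PySem.List.pyRange_one_cons (by omega : y < M)]
      simp [bInnerL, hnb]
  | succ f ih =>
    intro y hk hy M hM acc
    by_cases h : y * y ≤ rem
    · have hyM : y < M := hM y hy h
      have hyr : y ≤ rem := by nlinarith
      have hk' : (rem + 1 - (y + 1)).toNat ≤ f := by omega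
      have hnb : ¬ (y * y > rem) := not_lt.mpr h
      rw [PySem.List.pyRange_one_cons hyM]
      by_cases h2 : PySem.Int.mod rem y = 0
      · by_cases h3 : PySem.Int.floordiv rem y ≥ y
        · simp [bInner, bInnerL, h, hnb, h2, h3]
          exact ih (y + 1) hk' (by omega) M hM (acc ++ [(x, y, PySem.Int.floordiv rem y)])
        · simp [bInner, bInnerL, h, hnb, h2, h3]
          exact ih (y + 1) hk' (by omega) M hM acc
      · simp [bInner, bInnerL, h, hnb, h2]
        exact ih (y + 1) hk' (by omega) M hM acc
    · have hnb : y * y > rem := lt_of_not_ge fun hcon => h hcon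
      rw [show bInner x rem (f + 1) y acc = acc from by simp [bInner, h]]
      by_cases hMy : M ≤ y
      · rw [PySem.List.pyRange_one_eq_nil hMy]; rfl
      · rw [PySem.List.pyRange_one_cons (by omega : y < M)]
        simp [bInnerL, hnb]

theorem bOuter_as_list (n : Int) (hn : 0 ≤ n) :
    ∀ (f : Nat) (x : Int), (n + 1 - x).toNat ≤ f → 2 ≤ x →
      ∀ acc, bOuter n f x acc = bOuterL n (PySem.List.pyRange x (n + 1) 1) acc := by
  intro f
  induction f with
  | zero =>
    intro x hk h2x acc
    show acc = _
    rw [PySem.List.pyRange_one_eq_nil (by omega : n + 1 ≤ x)]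
    rfl
  | succ f ih =>
    intro x hk h2x acc
    by_cases h : x * x * x ≤ n
    · have hxn : x ≤ n := by nlinarith
      have hxn1 : x < n + 1 := by omega
      have hk' : (n + 1 - (x + 1)).toNat ≤ f := by omega
      have hnb : ¬ (x * x * x > n) := not_lt.mpr h
      rw [PySem.List.pyRange_one_cons hxn1]
      by_cases h2 : PySem.Int.mod n x = 0
      · have hxpos : (0:Int) < x := by omega
        have hrem0 : 0 ≤ PySem.Int.floordiv n x := by
          rw [PySem.Int.floordiv_eq_ediv_of_pos hxpos]
          exact Int.ediv_nonneg hn (by omega)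
        have hremn : PySem.Int.floordiv n x ≤ n := by
          rw [PySem.Int.floordiv_eq_ediv_of_pos hxpos]
          exact Int.ediv_le_self x hn
        have hbody := bInner_as_list x (PySem.Int.floordiv n x) hrem0
          (PySem.Int.floordiv n x + 1).toNat x (by omega) (by omega) (n + 1)
          (fun z hz hzz => by nlinarith) acc
        simp [bOuter, bOuterL, h, hnb, h2]
        rw [hbody]
        exact ih (x + 1) hk' (by omega) (bInnerL x (PySem.Int.floordiv n x) (PySem.List.pyRange x (n + 1) 1) acc)
      · simp [bOuter, bOuterL, h, hnb, h2]
        exact ih (x + 1) hk' (by omega) acc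
    · rw [show bOuter n (f + 1) x acc = acc from by simp [bOuter, h]]
      by_cases hMy : n + 1 ≤ x
      · rw [PySem.List.pyRange_one_eq_nil hMy]; rfl
      · rw [PySem.List.pyRange_one_cons (by omega : x < n + 1)]
        simp [bOuterL, show x * x * x > n from lt_of_not_ge fun hcon => h hcon]

-- takeWhile = filter-- takeWhile = filter for a test that, along an increasing list of ints ≥ 2, fails monotonically
theorem takeWhile_eq_filter_mono (p : Int → Bool)
    (hmono : ∀ a b : Int, 2 ≤ a → a < b → p a = false → p b = false) :
    ∀ (L : List Int), L.Pairwise (· < ·) → (∀ a ∈ L, (2:Int) ≤ a) →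
      L.takeWhile p = L.filter p := by
  intro L
  induction L with
  | nil => intro _ _; simp
  | cons a l ih =>
    intro hp h2
    rw [List.pairwise_cons] at hp
    by_cases hpa : p a = true
    · simp [hpa, ih hp.2 (fun b hb => h2 b (List.mem_cons_of_mem a hb))]
    · rw [Bool.not_eq_true] at hpa
      have : l.filter p = [] := List.filter_eq_nil_iff.mpr (fun b hb =>
        by simp [hmono a b (h2 a (List.mem_cons_self)) (hp.1 b hb) hpa])
      simp [hpa, this]

theorem mono_cube (n : Int) : ∀ a b : Int, 2 ≤ a → a < b →
    (!decide (a * a * a > n)) = false → (!decide (b * b * b > n)) = false := by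
  intro a b h2 hab
  simp only [Bool.not_eq_false', decide_eq_true_eq, gt_iff_lt]
  intro h
  have ha : (0:Int) < a := by omega
  have hb : (0:Int) < b := by omega
  have h1 : a * a * a ≤ a * a * b := by nlinarith
  have h2' : a * a * b ≤ a * b * b := by nlinarith
  have h3 : a * b * b ≤ b * b * b := by nlinarith
  linarith

theorem mono_sq (rem : Int) : ∀ a b : Int, 2 ≤ a → a < b →
    (!decide (a * a > rem)) = false → (!decide (b * b > rem)) = false := by
  intro a b h2 hab
  simp only [Bool.not_eq_false', decide_eq_true_eq, gt_iff_lt]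
  intro h
  nlinarith

-- per-x equality of A's inner loop over the divisor list and B's inner loop over range(x, n+1)
theorem inner_body_eq (n x : Int) (hn : 0 ≤ n) (h2x : 2 ≤ x) (hxn : x ≤ n)
    (hq1 : PySem.Int.mod n x = 0) :
    aInner x (PySem.Int.floordiv n x)
      ((PySem.List.pyRange 2 (n + 1) 1).filter (fun d => decide (PySem.Int.mod n d = 0))) [] =
    bInnerL x (PySem.Int.floordiv n x) (PySem.List.pyRange x (n + 1) 1) [] := by
  have hxpos : (0:Int) < x := by omega
  have hdvd : x ∣ n := (PySem.Int.mod_eq_zero_iff_dvd n x).mp hq1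
  set rem := PySem.Int.floordiv n x with hrem
  have hremdvd : rem ∣ n := by
    refine ⟨x, ?_⟩
    rw [hrem, PySem.Int.floordiv_eq_ediv_of_pos hxpos]
    exact (Int.ediv_mul_cancel hdvd).symm
  have hRp := PySem.List.pairwise_lt_pyRange_one 2 (n + 1)
  have hR2 : ∀ a ∈ PySem.List.pyRange 2 (n + 1) 1, (2:Int) ≤ a := by
    intro a ha; rw [PySem.List.mem_pyRange_one] at ha; omega
  -- range(x, n+1) is the ≥ x tail of range(2, n+1)
  have hrange : PySem.List.pyRange x (n + 1) 1 =
      (PySem.List.pyRange 2 (n + 1) 1).filter (fun y => !decide (y < x)) := by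
    rw [PySem.List.pyRange_one_append 2 x (n + 1) (by omega) (by omega), List.filter_append]
    rw [List.filter_eq_nil_iff.mpr (fun b hb => by
      rw [PySem.List.mem_pyRange_one] at hb; simp; omega)]
    rw [List.filter_eq_self.mpr (fun b hb => by
      rw [PySem.List.mem_pyRange_one] at hb; simp; omega)]
    simp
  rw [aInner_eq_bInner x rem _ ((hRp.filter _).imp le_of_lt), bInnerL_eq, bInnerL_eq, hrange]
  have htwA := takeWhile_eq_filter_mono _ (mono_sq rem)
      (((PySem.List.pyRange 2 (n + 1) 1).filter (fun d => decide (PySem.Int.mod n d = 0))).filter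
        (fun y => !decide (y < x)))
      ((hRp.filter _).filter _)
      (fun a ha => hR2 a (List.mem_of_mem_filter (List.mem_of_mem_filter ha)))
  have htwB := takeWhile_eq_filter_mono _ (mono_sq rem)
      ((PySem.List.pyRange 2 (n + 1) 1).filter (fun y => !decide (y < x)))
      (hRp.filter _)
      (fun a ha => hR2 a (List.mem_of_mem_filter ha))
  rw [htwA, htwB]
  have hlists :
      ((((PySem.List.pyRange 2 (n + 1) 1).filter (fun d => decide (PySem.Int.mod n d = 0))).filter
          (fun y => !decide (y < x))).filter (fun y => !decide (y * y > rem))).filter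
        (fun y => decide (PySem.Int.mod rem y = 0)) =
      (((PySem.List.pyRange 2 (n + 1) 1).filter (fun y => !decide (y < x))).filter
          (fun y => !decide (y * y > rem))).filter
        (fun y => decide (PySem.Int.mod rem y = 0)) := by
    simp only [List.filter_filter]
    refine List.filter_congr ?_
    intro a _
    by_cases hqr : PySem.Int.mod rem a = 0
    · have hq1a : PySem.Int.mod n a = 0 := by
        rw [PySem.Int.mod_eq_zero_iff_dvd] at hqr ⊢
        exact hqr.trans hremdvd
      simp [hqr, hq1a]
    · simp [hqr]
  rw [hlists]

-- ===== VERDICT (by name: the statement is the Claim_ definition above) =====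
theorem get_3factor_decompositions_spec : Claim_equal_get_3factor_decompositions := by
  intro n _ hn
  unfold Spec_get_3factor_decompositions
  show get_3factor_decompositions n = get_3factor_decompositions_alt n
  unfold get_3factor_decompositions get_3factor_decompositions_alt
  have hB : bOuter n (n + 1).toNat 2 [] = bOuterL n (PySem.List.pyRange 2 (n + 1) 1) [] :=
    bOuter_as_list n hn (n + 1).toNat 2 (by omega) (le_refl 2) []
  rw [divisors_eq n hn, aOuter_eq, hB, bOuterL_eq]
  have hRp := PySem.List.pairwise_lt_pyRange_one 2 (n + 1)
  have hR2 : ∀ a ∈ PySem.List.pyRange 2 (n + 1) 1, (2:Int) ≤ a := by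
    intro a ha; rw [PySem.List.mem_pyRange_one] at ha; omega
  rw [takeWhile_eq_filter_mono _ (mono_cube n)
        ((PySem.List.pyRange 2 (n + 1) 1).filter (fun d => decide (PySem.Int.mod n d = 0)))
        (hRp.filter _) (fun a ha => hR2 a (List.mem_of_mem_filter ha)),
      takeWhile_eq_filter_mono _ (mono_cube n) (PySem.List.pyRange 2 (n + 1) 1) hRp hR2]
  have hlists :
      (((PySem.List.pyRange 2 (n + 1) 1).filter (fun d => decide (PySem.Int.mod n d = 0))).filter
          (fun x => !decide (x * x * x > n))).filter (fun x => decide (PySem.Int.mod n x = 0)) =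
      ((PySem.List.pyRange 2 (n + 1) 1).filter (fun x => !decide (x * x * x > n))).filter
        (fun x => decide (PySem.Int.mod n x = 0)) := by
    simp only [List.filter_filter]
    refine List.filter_congr ?_
    intro a _
    cases hq : decide (PySem.Int.mod n a = 0) <;> simp [hq]
  rw [hlists]
  simp only [List.nil_append]
  refine List.flatMap_congr ?_
  intro x hx
  rw [List.mem_filter, List.mem_filter, PySem.List.mem_pyRange_one] at hx
  obtain ⟨⟨⟨h2x, hxn⟩, _⟩, hq1⟩ := hx
  exact inner_body_eq n x hn h2x (by omega) (by simpa using hq1)
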